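-- pv_equiv track=rewrite | github.com/sohilsayed/Vmusic | app/src/test/rebuild.py | parse_code_content
-- ===== SOURCE A (Python) =====
-- def parse_code_content(lines):
--     files = {}
--     current_file = None
--     buffer = []
--
--     for line in lines:
--         if line.startswith("// File: "):
--             if current_file:
--                 files[current_file] = "\n".join(buffer).rstrip()
--                 buffer = []
--             current_file = line[len("// File: "):].strip()
--         else:
--             buffer.append(line)
--     if current_file:
--         files[current_file] = "\n".join(buffer).rstrip()
--
--     return files
-- ===== SOURCE B (Python) =====
-- def parse_code_content(lines):
--     marker = "// File: "
--
--     def split_at_marker(ls):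
--         # (prefix of non-marker lines, rest starting at the first marker)
--         k = 0
--         while k < len(ls) and not ls[k].startswith(marker):
--             k += 1
--         return ls[:k], ls[k:]
--
--     files = {}
--     pre, rest = split_at_marker(lines)
--     while rest:
--         body, rest2 = split_at_marker(rest[1:])
--         files[rest[0][len(marker):].strip()] = "\n".join(pre + body).rstrip()
--         pre, rest = [], rest2
--     return files
-- ===== Notes on version B (the rewrite author's own statement) =====
-- stated objective: alternative
-- what changed: Replaces A's single pass with a mutable (files, current_file, buffer) state machine by a segmentation decomposition: a split_at_marker helper cuts the line list at the next '// File: ' marker, and a loop over marker-delimited segments emits each file from its slice directly (no current-file/buffer state).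
-- outside the precondition, e.g. on parse_code_content(['// File: a', 'x', '// File: ', 'y']): A returns {'a': 'x'}, B returns {'a': 'x', '': 'y'}
import Mathlib
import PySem

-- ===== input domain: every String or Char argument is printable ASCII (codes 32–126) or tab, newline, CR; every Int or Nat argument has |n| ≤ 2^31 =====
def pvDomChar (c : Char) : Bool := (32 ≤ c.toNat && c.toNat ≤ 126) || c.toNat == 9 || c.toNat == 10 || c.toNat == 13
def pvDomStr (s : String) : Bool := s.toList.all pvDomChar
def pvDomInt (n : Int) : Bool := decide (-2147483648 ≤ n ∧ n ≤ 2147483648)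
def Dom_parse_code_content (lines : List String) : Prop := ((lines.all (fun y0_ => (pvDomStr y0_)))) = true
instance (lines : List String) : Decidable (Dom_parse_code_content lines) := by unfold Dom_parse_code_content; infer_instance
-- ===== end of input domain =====

-- B replaces A's one-pass (files, current_file, buffer) state machine by a marker-segmentation
-- decomposition (split at each '// File: ' marker, emit each segment); objective: alternative, same cost.


-- ===== PORT A =====
-- line[len("// File: "):].strip()
def pvName (line : String) : String :=
  PySem.Str.strip (PySem.Str.slice line (some 9) none)

-- the body of A's for-loop; Python's `if current_file:` is `some c` with c ≠ ""
def pvStepA (s : PySem.Dict String String × Option String × List String) (line : String) :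
    PySem.Dict String String × Option String × List String :=
  if PySem.Str.startswith line "// File: " then
    match s.2.1 with
    | some c =>
        if c = "" then (s.1, some (pvName line), s.2.2)
        else (s.1.insert c (PySem.Str.rstrip (PySem.Str.join "\n" s.2.2)), some (pvName line),
              ([] : List String))
    | none => (s.1, some (pvName line), s.2.2)
  else (s.1, s.2.1, s.2.2 ++ [line])

-- A's trailing `if current_file:` flush, then `return files`
def pvFinishA (s : PySem.Dict String String × Option String × List String) :
    List (String × String) :=
  match s.2.1 with
  | some c =>
      if c = "" then s.1.items
      else (s.1.insert c (PySem.Str.rstrip (PySem.Str.join "\n" s.2.2))).items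
  | none => s.1.items

def parse_code_content (lines : List String) : List (String × String) :=
  pvFinishA (lines.foldl pvStepA (PySem.Dict.empty, none, ([] : List String)))

-- ===== PORT B =====
-- B's split_at_marker: (prefix of non-marker lines, rest starting at the first marker)
def pvSplit : List String → List String × List String
  | [] => ([], [])
  | l :: ls =>
      if PySem.Str.startswith l "// File: " then ([], l :: ls)
      else ((pvSplit ls).1.cons l, (pvSplit ls).2)

theorem pvSplit_snd_length_le (ls : List String) : (pvSplit ls).2.length ≤ ls.length := by
  induction ls with
  | nil => simp [pvSplit]
  | cons l ls ih =>
      simp only [pvSplit]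
      split
      · simp
      · simpa using Nat.le_succ_of_le ih

-- B's while loop over marker-delimited segments
def pvGo : List String → List String → PySem.Dict String String → PySem.Dict String String
  | _, [], files => files
  | pre, head :: tail, files =>
      pvGo [] (pvSplit tail).2
        (files.insert (pvName head)
          (PySem.Str.rstrip (PySem.Str.join "\n" (pre ++ (pvSplit tail).1))))
  termination_by _ rest _ => rest.length
  decreasing_by
    exact Nat.lt_succ_of_le (pvSplit_snd_length_le tail)

def parse_code_content_alt (lines : List String) : List (String × String) :=
  (pvGo (pvSplit lines).1 (pvSplit lines).2 PySem.Dict.empty).items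

-- ===== PRECONDITION & SPEC =====
-- Pre_ excludes inputs containing a marker line whose filename strips to empty: there A's
-- truthiness test `if current_file:` treats the empty name as "no current file", an accident of
-- the implementation that silently merges that section into the next file, while B records it
-- under the empty name — a corner (empty filename) no caller would specify either way.
def Pre_parse_code_content (lines : List String) : Prop :=
  ∀ l ∈ lines, PySem.Str.startswith l "// File: " = true → pvName l ≠ ""
instance (lines : List String) : Decidable (Pre_parse_code_content lines) := by
  unfold Pre_parse_code_content; infer_instance

def pvWitness_parse_code_content : List String := ["// File: a.py", "print(1)", "// File: b.py"]

def Spec_parse_code_content (lines : List String) (out : List (String × String)) : Prop := out = parse_code_content_alt lines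
instance (lines : List String) (out : List (String × String)) : Decidable (Spec_parse_code_content lines out) := by unfold Spec_parse_code_content; infer_instance

-- ===== CLAIM (what is proved, stated in full; the proofs are below) =====
def Claim_equal_parse_code_content : Prop := ∀ (lines : List String), Dom_parse_code_content lines → Pre_parse_code_content lines → Spec_parse_code_content lines (parse_code_content lines)

-- ===== LEMMAS AND PROOFS =====

-- running A's loop from a live current file c with pending buffer buf over rest
theorem pvLemSome (rest : List String) :
    ∀ (files : PySem.Dict String String) (c : String) (buf : List String), c ≠ "" →
    (∀ l ∈ rest, PySem.Str.startswith l "// File: " = true → pvName l ≠ "") →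
    pvFinishA (rest.foldl pvStepA (files, some c, buf)) =
      (pvGo [] (pvSplit rest).2
        (files.insert c
          (PySem.Str.rstrip (PySem.Str.join "\n" (buf ++ (pvSplit rest).1))))).items := by
  induction rest with
  | nil =>
      intro files c buf hc _
      simp [pvFinishA, pvSplit, pvGo, hc]
  | cons l ls ih =>
      intro files c buf hc h
      by_cases hm : PySem.Str.startswith l "// File: " = true
      · have hname : pvName l ≠ "" := h l (by simp) hm
        simp only [List.foldl_cons, pvStepA, hm, if_pos, if_neg hc, pvSplit]
        rw [ih _ _ _ hname (fun x hx => h x (by simp [hx]))]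
        simp [pvGo]
      · simp only [List.foldl_cons, pvStepA, hm, pvSplit, Bool.false_eq_true, if_false]
        rw [ih _ _ _ hc (fun x hx => h x (by simp [hx]))]
        simp [List.append_assoc]

-- running A's loop with no current file yet: buf holds the would-be preamble
theorem pvLemNone (rest : List String) :
    ∀ (files : PySem.Dict String String) (buf : List String),
    (∀ l ∈ rest, PySem.Str.startswith l "// File: " = true → pvName l ≠ "") →
    pvFinishA (rest.foldl pvStepA (files, none, buf)) =
      (pvGo (buf ++ (pvSplit rest).1) (pvSplit rest).2 files).items := by
  induction rest with
  | nil => intro files buf _; simp [pvFinishA, pvSplit, pvGo]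
  | cons l ls ih =>
      intro files buf h
      by_cases hm : PySem.Str.startswith l "// File: " = true
      · have hname : pvName l ≠ "" := h l (by simp) hm
        simp only [List.foldl_cons, pvStepA, hm, if_pos, pvSplit]
        rw [pvLemSome ls _ _ _ hname (fun x hx => h x (by simp [hx]))]
        simp [pvGo]
      · simp only [List.foldl_cons, pvStepA, hm, pvSplit, Bool.false_eq_true, if_false]
        rw [ih _ _ (fun x hx => h x (by simp [hx]))]
        simp [List.append_assoc]

-- ===== VERDICT (by name: the statement is the Claim_ definition above) =====
theorem parse_code_content_spec : Claim_equal_parse_code_content := by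
  intro lines _ hpre
  unfold Spec_parse_code_content parse_code_content parse_code_content_alt
  rw [pvLemNone lines PySem.Dict.empty [] hpre]
  simp
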